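-- pv_equiv track=rewrite | github.com/luis12007/compiler_c | compiler_c/object_code_generator.py | object_code_to_binary
-- ===== SOURCE A (Python) =====
-- def object_code_to_binary(object_code):
--     """
--     Converts object code to binary instructions based on a predefined ISA.
--     Args:
--         object_code (list): List of assembly-like instructions.
--     Returns:
--         binary_code (list): List of binary instructions.
--     """
--
--     # Define an example ISA with opcodes
--     isa = {
--         "MOV": "0001",
--         "ADD": "0010",
--         "SUB": "0011",
--         "MUL": "0100",
--         "DIV": "0101",
--         "CMP": "0110",
--         "JE": "0111",
--         "PUSH": "1000",
--         "POP": "1001",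
--         "RET": "1010",
--         "label": "1011"
--     }
--
--     # Example register mapping
--     registers = {
--         "AX": "000",
--         "BP": "001",
--         "SP": "010",
--         "t0": "011",
--         "t1": "100"
--     }
--
--     binary_code = []
--
--     for line in object_code:
--         parts = line.split()
--
--         # Process instructions
--         if parts[0] in isa:
--             opcode = isa[parts[0]]
--
--             if parts[0] == "MOV":
--                 dest = registers.get(parts[1].strip(","), "111")  # Destination register
--                 src = registers.get(parts[2], "000")  # Source register or immediate value
--                 binary_code.append(f"{opcode} {dest} {src}")
--
--             elif parts[0] in {"ADD", "SUB", "MUL", "DIV"}: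
--                 dest = registers.get(parts[1].strip(","), "111")
--                 src = registers.get(parts[2], "000")
--                 binary_code.append(f"{opcode} {dest} {src}")
--
--             elif parts[0] == "CMP":
--                 src = registers.get(parts[1].strip(","), "000")
--                 binary_code.append(f"{opcode} {src}")
--
--             elif parts[0] == "JE":
--                 label = parts[1]
--                 binary_code.append(f"{opcode} {label}")
--
--             elif parts[0] == "PUSH":
--                 reg = registers.get(parts[1], "111")
--                 binary_code.append(f"{opcode} {reg}")
--
--             elif parts[0] == "POP":
--                 reg = registers.get(parts[1], "111")
--                 binary_code.append(f"{opcode} {reg}")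
--
--             elif parts[0] == "RET":
--                 binary_code.append(opcode)
--
--         # Process labels
--         elif line.endswith(":"):
--             label_name = line.replace(":", "")
--             binary_code.append(f"{isa['label']} {label_name}")
--
--     return binary_code
-- ===== SOURCE B (Python) =====
-- def object_code_to_binary(object_code):
--     """Table-driven variant: one spec table keyed by opcode drives a single uniform loop."""
--     # op -> None (recognized, emits nothing) or (opcode bits, operand specs);
--     # an operand spec is "raw" or (strip_trailing_comma, register-lookup default)
--     table = {
--         "MOV":  ("0001", [(True, "111"), (False, "000")]),
--         "ADD":  ("0010", [(True, "111"), (False, "000")]),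
--         "SUB":  ("0011", [(True, "111"), (False, "000")]),
--         "MUL":  ("0100", [(True, "111"), (False, "000")]),
--         "DIV":  ("0101", [(True, "111"), (False, "000")]),
--         "CMP":  ("0110", [(True, "000")]),
--         "JE":   ("0111", ["raw"]),
--         "PUSH": ("1000", [(False, "111")]),
--         "POP":  ("1001", [(False, "111")]),
--         "RET":  ("1010", []),
--         "label": None,
--     }
--     registers = {"AX": "000", "BP": "001", "SP": "010", "t0": "011", "t1": "100"}
--     out = []
--     for line in object_code:
--         parts = line.split()
--         if parts[0] in table:
--             spec = table[parts[0]]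
--             if spec is not None:
--                 opcode, operands = spec
--                 fields = [opcode]
--                 for i, op in enumerate(operands):
--                     tok = parts[i + 1]
--                     if op == "raw":
--                         fields.append(tok)
--                     else:
--                         strip, dflt = op
--                         if strip:
--                             tok = tok.strip(",")
--                         fields.append(registers.get(tok, dflt))
--                 out.append(" ".join(fields))
--         elif line.endswith(":"):
--             out.append("1011 " + line.replace(":", ""))
--     return out
-- ===== Notes on version B (the rewrite author's own statement) =====
-- stated objective: idiomatic
-- what changed: Replaces the eight-way if/elif chain with a single spec table keyed by opcode (operand count, comma-stripping flag, lookup default or raw) driving one uniform emit loop.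
import Mathlib
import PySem

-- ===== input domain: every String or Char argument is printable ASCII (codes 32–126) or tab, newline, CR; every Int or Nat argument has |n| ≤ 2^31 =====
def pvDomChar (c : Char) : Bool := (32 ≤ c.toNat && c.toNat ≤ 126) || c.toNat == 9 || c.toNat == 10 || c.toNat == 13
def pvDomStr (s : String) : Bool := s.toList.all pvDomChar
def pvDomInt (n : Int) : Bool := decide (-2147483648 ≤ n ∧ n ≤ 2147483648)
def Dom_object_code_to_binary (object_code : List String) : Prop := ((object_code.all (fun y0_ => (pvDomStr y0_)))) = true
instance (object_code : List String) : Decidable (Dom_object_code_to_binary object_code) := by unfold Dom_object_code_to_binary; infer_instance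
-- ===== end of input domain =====

-- B changes the eight-way if/elif chain into table-driven dispatch (one spec table, one uniform loop); objective: idiomatic.

-- ===== PORT A =====
def pvIsaA : PySem.Dict (List Char) (List Char) := PySem.Dict.ofList [
  ("MOV".toList, "0001".toList), ("ADD".toList, "0010".toList), ("SUB".toList, "0011".toList),
  ("MUL".toList, "0100".toList), ("DIV".toList, "0101".toList), ("CMP".toList, "0110".toList),
  ("JE".toList, "0111".toList), ("PUSH".toList, "1000".toList), ("POP".toList, "1001".toList),
  ("RET".toList, "1010".toList), ("label".toList, "1011".toList)]

def pvRegsA : PySem.Dict (List Char) (List Char) := PySem.Dict.ofList [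
  ("AX".toList, "000".toList), ("BP".toList, "001".toList), ("SP".toList, "010".toList),
  ("t0".toList, "011".toList), ("t1".toList, "100".toList)]

-- one iteration of A's loop; parts[i] is ported as getD i [] — Pre_ excludes the inputs
-- where Python's parts[0]/parts[1]/parts[2] would raise IndexError, so the default is never reached
def pvStepA (binary_code : List String) (line : String) : List String :=
  let parts := PySem.Chars.split₀ line.toList
  let p0 := parts.getD 0 []
  if pvIsaA.contains p0 then
    let opcode := (pvIsaA.get? p0).getD []
    if p0 = "MOV".toList then
      let dest := pvRegsA.getD (PySem.Chars.stripChars (parts.getD 1 []) ",".toList) "111".toList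
      let src := pvRegsA.getD (parts.getD 2 []) "000".toList
      binary_code ++ [String.ofList (opcode ++ ' ' :: dest ++ ' ' :: src)]
    else if p0 ∈ PySem.Set.ofList ["ADD".toList, "SUB".toList, "MUL".toList, "DIV".toList] then
      let dest := pvRegsA.getD (PySem.Chars.stripChars (parts.getD 1 []) ",".toList) "111".toList
      let src := pvRegsA.getD (parts.getD 2 []) "000".toList
      binary_code ++ [String.ofList (opcode ++ ' ' :: dest ++ ' ' :: src)]
    else if p0 = "CMP".toList then
      let src := pvRegsA.getD (PySem.Chars.stripChars (parts.getD 1 []) ",".toList) "000".toList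
      binary_code ++ [String.ofList (opcode ++ ' ' :: src)]
    else if p0 = "JE".toList then
      let label := parts.getD 1 []
      binary_code ++ [String.ofList (opcode ++ ' ' :: label)]
    else if p0 = "PUSH".toList then
      let reg := pvRegsA.getD (parts.getD 1 []) "111".toList
      binary_code ++ [String.ofList (opcode ++ ' ' :: reg)]
    else if p0 = "POP".toList then
      let reg := pvRegsA.getD (parts.getD 1 []) "111".toList
      binary_code ++ [String.ofList (opcode ++ ' ' :: reg)]
    else if p0 = "RET".toList then
      binary_code ++ [String.ofList opcode]
    else
      binary_code
  else if PySem.Chars.endswith line.toList ":".toList then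
    let label_name := PySem.Chars.replace line.toList ":".toList []
    binary_code ++ [String.ofList ((pvIsaA.getD "label".toList []) ++ ' ' :: label_name)]
  else
    binary_code

def object_code_to_binary (object_code : List String) : List String :=
  object_code.foldl pvStepA []

-- ===== PORT B =====
-- an operand spec: looked-up register token (strip a trailing comma?, lookup default) or raw
inductive PvOperand where
  | raw : PvOperand
  | reg : Bool → List Char → PvOperand
deriving DecidableEq, Repr

-- op ↦ none (recognized, emits nothing) or (opcode bits, operand specs)
def pvTableB : PySem.Dict (List Char) (Option (List Char × List PvOperand)) := PySem.Dict.ofList [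
  ("MOV".toList,  some ("0001".toList, [.reg true "111".toList, .reg false "000".toList])),
  ("ADD".toList,  some ("0010".toList, [.reg true "111".toList, .reg false "000".toList])),
  ("SUB".toList,  some ("0011".toList, [.reg true "111".toList, .reg false "000".toList])),
  ("MUL".toList,  some ("0100".toList, [.reg true "111".toList, .reg false "000".toList])),
  ("DIV".toList,  some ("0101".toList, [.reg true "111".toList, .reg false "000".toList])),
  ("CMP".toList,  some ("0110".toList, [.reg true "000".toList])),
  ("JE".toList,   some ("0111".toList, [.raw])),
  ("PUSH".toList, some ("1000".toList, [.reg false "111".toList])),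
  ("POP".toList,  some ("1001".toList, [.reg false "111".toList])),
  ("RET".toList,  some ("1010".toList, [])),
  ("label".toList, none)]

def pvRegsB : PySem.Dict (List Char) (List Char) := PySem.Dict.ofList [
  ("AX".toList, "000".toList), ("BP".toList, "001".toList), ("SP".toList, "010".toList),
  ("t0".toList, "011".toList), ("t1".toList, "100".toList)]

def pvFieldB (parts : List (List Char)) (iop : PvOperand × Nat) : List Char :=
  let tok := parts.getD (iop.2 + 1) []   -- parts[i+1]; Pre_ excludes the IndexError inputs
  match iop.1 with
  | .raw => tok
  | .reg strip dflt =>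
      pvRegsB.getD (if strip then PySem.Chars.stripChars tok ",".toList else tok) dflt

def pvStepB (out : List String) (line : String) : List String :=
  let parts := PySem.Chars.split₀ line.toList
  match pvTableB.get? (parts.getD 0 []) with
  | some none => out
  | some (some (opcode, operands)) =>
      let fields := opcode :: (operands.zipIdx.map (pvFieldB parts))
      out ++ [String.ofList (PySem.Chars.join " ".toList fields)]
  | none =>
      if PySem.Chars.endswith line.toList ":".toList then
        out ++ [String.ofList ("1011 ".toList ++ PySem.Chars.replace line.toList ":".toList [])]
      else out

def object_code_to_binary_alt (object_code : List String) : List String :=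
  object_code.foldl pvStepB []

-- ===== PRECONDITION & SPEC =====
-- Pre_ excludes exactly the inputs where Python A raises IndexError: a line that splits to no
-- words (parts[0]), or an instruction word followed by fewer operands than its branch indexes.
def Pre_object_code_to_binary (object_code : List String) : Prop :=
  ∀ line ∈ object_code,
    let parts := PySem.Chars.split₀ line.toList
    parts ≠ [] ∧
    (parts.getD 0 [] ∈ ["MOV".toList, "ADD".toList, "SUB".toList, "MUL".toList, "DIV".toList] → 3 ≤ parts.length) ∧
    (parts.getD 0 [] ∈ ["CMP".toList, "JE".toList, "PUSH".toList, "POP".toList] → 2 ≤ parts.length)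
instance (object_code : List String) : Decidable (Pre_object_code_to_binary object_code) := by
  unfold Pre_object_code_to_binary; infer_instance

def pvWitness_object_code_to_binary : List String :=
  ["MOV AX, t0", "loop:", "CMP t1", "JE loop", "PUSH AX", "POP SP", "RET", "nonsense here"]

def Spec_object_code_to_binary (object_code : List String) (out : List String) : Prop := out = object_code_to_binary_alt object_code
instance (object_code : List String) (out : List String) : Decidable (Spec_object_code_to_binary object_code out) := by unfold Spec_object_code_to_binary; infer_instance

-- ===== CLAIM (what is proved, stated in full; the proofs are below) =====
def Claim_equal_object_code_to_binary : Prop := ∀ (object_code : List String), Dom_object_code_to_binary object_code → Pre_object_code_to_binary object_code → Spec_object_code_to_binary object_code (object_code_to_binary object_code)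

-- ===== LEMMAS AND PROOFS =====

theorem pvIsaA_mk : pvIsaA = PySem.Dict.mk [
    (['M','O','V'], "0001".toList), (['A','D','D'], "0010".toList), (['S','U','B'], "0011".toList),
    (['M','U','L'], "0100".toList), (['D','I','V'], "0101".toList), (['C','M','P'], "0110".toList),
    (['J','E'], "0111".toList), (['P','U','S','H'], "1000".toList), (['P','O','P'], "1001".toList),
    (['R','E','T'], "1010".toList), (['l','a','b','e','l'], "1011".toList)] := by decide

theorem pvTableB_mk : pvTableB = PySem.Dict.mk [
    (['M','O','V'],  some ("0001".toList, [.reg true "111".toList, .reg false "000".toList])),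
    (['A','D','D'],  some ("0010".toList, [.reg true "111".toList, .reg false "000".toList])),
    (['S','U','B'],  some ("0011".toList, [.reg true "111".toList, .reg false "000".toList])),
    (['M','U','L'],  some ("0100".toList, [.reg true "111".toList, .reg false "000".toList])),
    (['D','I','V'],  some ("0101".toList, [.reg true "111".toList, .reg false "000".toList])),
    (['C','M','P'],  some ("0110".toList, [.reg true "000".toList])),
    (['J','E'],   some ("0111".toList, [.raw])),
    (['P','U','S','H'], some ("1000".toList, [.reg false "111".toList])),
    (['P','O','P'],  some ("1001".toList, [.reg false "111".toList])),
    (['R','E','T'],  some ("1010".toList, [])),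
    (['l','a','b','e','l'], none)] := by decide

theorem pvRegs_eq : pvRegsB = pvRegsA := by decide

theorem pvStep_eq (acc : List String) (line : String) : pvStepA acc line = pvStepB acc line := by
  simp only [pvStepA, pvStepB]
  rw [pvIsaA_mk, pvTableB_mk]
  by_cases h1 : (PySem.Chars.split₀ line.toList).getD 0 [] = ['M','O','V']
  · rw [h1]
    simp [PySem.Dict.contains_mk, PySem.Dict.get?_mk_cons, PySem.Dict.getD, pvFieldB,
      List.zipIdx, PySem.Chars.join_cons_cons, PySem.Chars.join_singleton, pvRegs_eq]
  by_cases h2 : (PySem.Chars.split₀ line.toList).getD 0 [] = ['A','D','D']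
  · rw [h2]
    simp [PySem.Dict.contains_mk, PySem.Dict.get?_mk_cons, PySem.Dict.getD, pvFieldB,
      List.zipIdx, PySem.Chars.join_cons_cons, PySem.Chars.join_singleton, pvRegs_eq, PySem.Set.mem_ofList]
  by_cases h3 : (PySem.Chars.split₀ line.toList).getD 0 [] = ['S','U','B']
  · rw [h3]
    simp [PySem.Dict.contains_mk, PySem.Dict.get?_mk_cons, PySem.Dict.getD, pvFieldB,
      List.zipIdx, PySem.Chars.join_cons_cons, PySem.Chars.join_singleton, pvRegs_eq, PySem.Set.mem_ofList]
  by_cases h4 : (PySem.Chars.split₀ line.toList).getD 0 [] = ['M','U','L']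
  · rw [h4]
    simp [PySem.Dict.contains_mk, PySem.Dict.get?_mk_cons, PySem.Dict.getD, pvFieldB,
      List.zipIdx, PySem.Chars.join_cons_cons, PySem.Chars.join_singleton, pvRegs_eq, PySem.Set.mem_ofList]
  by_cases h5 : (PySem.Chars.split₀ line.toList).getD 0 [] = ['D','I','V']
  · rw [h5]
    simp [PySem.Dict.contains_mk, PySem.Dict.get?_mk_cons, PySem.Dict.getD, pvFieldB,
      List.zipIdx, PySem.Chars.join_cons_cons, PySem.Chars.join_singleton, pvRegs_eq, PySem.Set.mem_ofList]
  by_cases h6 : (PySem.Chars.split₀ line.toList).getD 0 [] = ['C','M','P']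
  · rw [h6]
    simp [PySem.Dict.contains_mk, PySem.Dict.get?_mk_cons, PySem.Dict.getD, pvFieldB,
      List.zipIdx, PySem.Chars.join_cons_cons, PySem.Chars.join_singleton, pvRegs_eq]
  by_cases h7 : (PySem.Chars.split₀ line.toList).getD 0 [] = ['J','E']
  · rw [h7]
    simp [PySem.Dict.contains_mk, PySem.Dict.get?_mk_cons, pvFieldB,
      List.zipIdx, PySem.Chars.join_cons_cons, PySem.Chars.join_singleton]
  by_cases h8 : (PySem.Chars.split₀ line.toList).getD 0 [] = ['P','U','S','H']
  · rw [h8]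
    simp [PySem.Dict.contains_mk, PySem.Dict.get?_mk_cons, PySem.Dict.getD, pvFieldB,
      List.zipIdx, PySem.Chars.join_cons_cons, PySem.Chars.join_singleton, pvRegs_eq]
  by_cases h9 : (PySem.Chars.split₀ line.toList).getD 0 [] = ['P','O','P']
  · rw [h9]
    simp [PySem.Dict.contains_mk, PySem.Dict.get?_mk_cons, PySem.Dict.getD, pvFieldB,
      List.zipIdx, PySem.Chars.join_cons_cons, PySem.Chars.join_singleton, pvRegs_eq]
  by_cases h10 : (PySem.Chars.split₀ line.toList).getD 0 [] = ['R','E','T']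
  · rw [h10]
    simp [PySem.Dict.contains_mk, PySem.Dict.get?_mk_cons, List.zipIdx, PySem.Chars.join_singleton]
  by_cases h11 : (PySem.Chars.split₀ line.toList).getD 0 [] = ['l','a','b','e','l']
  · rw [h11]
    simp [PySem.Dict.contains_mk, PySem.Dict.get?_mk_cons]
  simp only [List.getD_eq_getElem?_getD] at h1 h2 h3 h4 h5 h6 h7 h8 h9 h10 h11
  simp [PySem.Dict.contains_mk, PySem.Dict.getD, PySem.Dict.get?,
    Ne.symm h1, Ne.symm h2, Ne.symm h3, Ne.symm h4, Ne.symm h5, Ne.symm h6, Ne.symm h7, Ne.symm h8, Ne.symm h9, Ne.symm h10, Ne.symm h11]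

theorem pvFoldl_eq (xs : List String) (acc : List String) :
    List.foldl pvStepA acc xs = List.foldl pvStepB acc xs := by
  induction xs generalizing acc with
  | nil => rfl
  | cons x xs ih => simp [List.foldl_cons, pvStep_eq, ih]

-- ===== VERDICT (by name: the statement is the Claim_ definition above) =====
theorem object_code_to_binary_spec : Claim_equal_object_code_to_binary := by
  intro oc _ _
  unfold Spec_object_code_to_binary object_code_to_binary object_code_to_binary_alt
  exact pvFoldl_eq oc []
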